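-- pv_equiv track=rewrite | github.com/cyyself/xs-rtl-analyze | cal.py | get_hier
-- ===== SOURCE A (Python) =====
-- def read_child_module(module_text, module_names):
--     res = dict() # instance_name -> module_name
--     lines = module_text.splitlines()
--     for line in lines:
--         if line.startswith("  "):
--             split_res = line.strip().split()
--             if len(split_res) >= 3 and split_res[2] == '(':
--                 instance_name = split_res[1]
--                 module_name = split_res[0]
--                 if module_name not in module_names:
--                     continue
--                 res[instance_name] = module_name
--     return res
--
-- def read_module_scala_files(module_text):
--     res = set()
--     for line in module_text.splitlines():
--         line_strip = line.strip()
--         comment_pos = line_strip.rfind("// ")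
--         if comment_pos != -1 and ".scala:" in line_strip:
--             source_pos = line_strip = line_strip[comment_pos + 3:].strip()
--             line_pos = source_pos.find(":")
--             res.add(source_pos[:line_pos].strip())
--     return res
--
-- def get_hier(src_dict):
--     assert "XSTop" in src_dict
--     res = dict() # module_name -> dict(instance_name -> module_name)
--     module_scala = dict()
--     to_process = ["XSTop"]
--     while to_process:
--         module_name = to_process.pop()
--         if module_name in res:
--             continue
--         module_text = src_dict[module_name]
--         child_modules = read_child_module(module_text, src_dict.keys())
--         module_scala[module_name] = read_module_scala_files(module_text)
--         res[module_name] = child_modules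
--         for child_module in child_modules.values():
--             if child_module not in res:
--                 to_process.append(child_module)
--     return (res, module_scala)
-- ===== SOURCE B (Python) =====
-- def read_child_module(module_text, module_names):
--     res = dict() # instance_name -> module_name
--     lines = module_text.splitlines()
--     for line in lines:
--         if line.startswith("  "):
--             split_res = line.strip().split()
--             if len(split_res) >= 3 and split_res[2] == '(':
--                 instance_name = split_res[1]
--                 module_name = split_res[0]
--                 if module_name not in module_names:
--                     continue
--                 res[instance_name] = module_name
--     return res
--
-- def read_module_scala_files(module_text):
--     res = set()
--     for line in module_text.splitlines():
--         line_strip = line.strip()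
--         comment_pos = line_strip.rfind("// ")
--         if comment_pos != -1 and ".scala:" in line_strip:
--             source_pos = line_strip = line_strip[comment_pos + 3:].strip()
--             line_pos = source_pos.find(":")
--             res.add(source_pos[:line_pos].strip())
--     return res
--
-- def get_hier(src_dict):
--     assert "XSTop" in src_dict
--     res = dict() # module_name -> dict(instance_name -> module_name)
--     module_scala = dict()
--     def visit(module_name):
--         if module_name in res:
--             return
--         module_text = src_dict[module_name]
--         child_modules = read_child_module(module_text, src_dict.keys())
--         module_scala[module_name] = read_module_scala_files(module_text)
--         res[module_name] = child_modules
--         # right-to-left keeps the memo dicts filled in the same order as a pop()-stack would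
--         for child_module in reversed(list(child_modules.values())):
--             visit(child_module)
--     visit("XSTop")
--     return (res, module_scala)
-- ===== Notes on version B (the rewrite author's own statement) =====
-- stated objective: alternative
-- what changed: A's explicit to_process stack with pop()/push bookkeeping is replaced by a recursive DFS helper visit() guarded by the memo dict, visiting children right to left; the helpers read_child_module/read_module_scala_files are kept verbatim.
import Mathlib
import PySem

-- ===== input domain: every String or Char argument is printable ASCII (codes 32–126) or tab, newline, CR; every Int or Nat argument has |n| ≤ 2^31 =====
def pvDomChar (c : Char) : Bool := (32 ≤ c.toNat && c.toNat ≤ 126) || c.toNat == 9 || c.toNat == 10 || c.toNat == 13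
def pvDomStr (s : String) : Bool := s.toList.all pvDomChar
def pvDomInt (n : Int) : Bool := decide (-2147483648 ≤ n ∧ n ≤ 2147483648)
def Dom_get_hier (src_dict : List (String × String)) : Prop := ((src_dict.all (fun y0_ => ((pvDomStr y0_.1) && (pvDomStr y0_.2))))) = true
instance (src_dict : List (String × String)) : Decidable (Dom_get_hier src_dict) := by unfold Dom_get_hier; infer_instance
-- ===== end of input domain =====

-- B replaces A's explicit pop()-stack worklist with a recursive DFS helper guarded by the memo
-- dict (children visited right to left); same results, same cost (objective: alternative).

-- the Python dict argument, rebuilt from its association list (shared input interpretation)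
def pvSrc (src_dict : List (String × String)) : PySem.Dict String String :=
  src_dict.foldl (fun d p => d.insert p.1 p.2) PySem.Dict.empty

-- helper shared verbatim by A and B (same function in both Python files)
def read_child_module (module_text : String) (module_names : List String) :
    PySem.Dict String String :=
  (PySem.Str.splitlines module_text).foldl (fun res line =>
    if PySem.Str.startswith line "  " then
      match PySem.Str.split₀ (PySem.Str.strip line) with
      | module_name :: instance_name :: third :: _ =>   -- len(split_res) >= 3
        if third == "(" then
          if module_names.contains module_name then res.insert instance_name module_name
          else res                                       -- 'continue'
        else res
      | _ => res
    else res) PySem.Dict.empty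

-- helper shared verbatim by A and B (same function in both Python files)
def read_module_scala_files (module_text : String) : PySem.Set String :=
  (PySem.Str.splitlines module_text).foldl (fun res line =>
    let line_strip := PySem.Str.strip line
    let comment_pos := PySem.Str.rfind line_strip "// "
    if comment_pos ≠ -1 && PySem.Str.isIn ".scala:" line_strip then
      let source_pos := PySem.Str.strip (PySem.Str.slice line_strip (some (comment_pos + 3)) none)
      let line_pos := PySem.Str.find source_pos ":"
      PySem.Set.add res (PySem.Str.strip (PySem.Str.slice source_pos none (some line_pos)))
    else res) PySem.Set.empty

-- how many keys of src are not yet in res (termination measure for the traversals)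
def pvUnvisited (src : PySem.Dict String String)
    (res : PySem.Dict String (PySem.Dict String String)) : Nat :=
  src.keys.countP (fun k => !(res.contains k))

lemma countP_lt_of_mem {α : Type} (l : List α) (p q : α → Bool)
    (himp : ∀ a, q a = true → p a = true) (m : α)
    (hm : m ∈ l) (hp : p m = true) (hq : q m = false) :
    l.countP q < l.countP p := by
  induction l with
  | nil => simp at hm
  | cons a t ih =>
    simp only [List.countP_cons]
    have hle : t.countP q ≤ t.countP p := List.countP_mono_left (fun a _ => himp a)
    rcases List.mem_cons.mp hm with h | h
    · subst h
      rw [if_pos hp, if_neg (by simp [hq])]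
      omega
    · have hlt := ih h
      by_cases hb : q a = true
      · rw [if_pos hb, if_pos (himp a hb)]; omega
      · rw [if_neg hb]
        split <;> omega

lemma pvUnvisited_insert_lt (src : PySem.Dict String String)
    (res : PySem.Dict String (PySem.Dict String String)) (m : String) (v)
    (hm : m ∈ src.keys) (hc : res.contains m = false) :
    pvUnvisited src (res.insert m v) < pvUnvisited src res := by
  unfold pvUnvisited
  refine countP_lt_of_mem _ _ _ ?_ m hm ?_ ?_
  · intro a ha
    simp only [PySem.Dict.contains_insert, Bool.not_eq_true', Bool.or_eq_false_iff] at ha ⊢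
    exact ha.2
  · simp [hc]
  · simp [PySem.Dict.contains_insert_self]

-- ===== PORT A =====
-- the while-loop over the explicit stack (to_process.pop() pops the LAST element);
-- the 'none' branch is where Python would raise KeyError (unreachable: stack elements are keys)
def get_hier_loop (src : PySem.Dict String String)
    (res : PySem.Dict String (PySem.Dict String String))
    (scala : PySem.Dict String (PySem.Set String))
    (stack : List String) :
    (PySem.Dict String (PySem.Dict String String)) × (PySem.Dict String (PySem.Set String)) :=
  match stack with
  | [] => (res, scala)
  | h0 :: t0 =>
    let m := (h0 :: t0).getLast (by simp)
    let stack' := (h0 :: t0).dropLast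
    if hc : res.contains m then
      get_hier_loop src res scala stack'
    else
      match hg : src.get? m with
      | none => (res, scala)
      | some module_text =>
        let child_modules := read_child_module module_text src.keys
        let scala' := scala.insert m (read_module_scala_files module_text)
        let res' := res.insert m child_modules
        let stack'' := child_modules.values.foldl
          (fun acc c => if !(res'.contains c) then acc ++ [c] else acc) stack'
        get_hier_loop src res' scala' stack''
termination_by (pvUnvisited src res, stack.length)
decreasing_by
  · apply Prod.Lex.right
    simp
  · apply Prod.Lex.left
    apply pvUnvisited_insert_lt
    · have : src.get? m ≠ none := by simp [hg]
      rw [Ne, PySem.Dict.get?_eq_none_iff_not_mem_keys] at this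
      exact not_not.mp this
    · exact Bool.not_eq_true _ ▸ (by simpa using hc)

def get_hier (src_dict : List (String × String)) :
    (List (String × List (String × String))) × (List (String × List String)) :=
  let src := pvSrc src_dict
  if src.contains "XSTop" then      -- the assert
    let st := get_hier_loop src PySem.Dict.empty PySem.Dict.empty ["XSTop"]
    (st.1.items.map (fun p => (p.1, p.2.items)), st.2.items)
  else ([], [])                     -- AssertionError in Python (outside Pre_)

-- ===== PORT B =====
-- Source B's recursive visit; fuel only makes the recursion structural (call depth is at most
-- the number of distinct keys + 1, so fuel src_dict.length + 1 is never exhausted)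
def get_hier_visit (src : PySem.Dict String String) :
    Nat → String →
    (PySem.Dict String (PySem.Dict String String)) × (PySem.Dict String (PySem.Set String)) →
    (PySem.Dict String (PySem.Dict String String)) × (PySem.Dict String (PySem.Set String))
  | 0, _, st => st
  | fuel + 1, module_name, st =>
    if st.1.contains module_name then st
    else
      match src.get? module_name with
      | none => st      -- KeyError in Python (unreachable: visit is only called on keys)
      | some module_text =>
        let child_modules := read_child_module module_text src.keys
        let st' := (st.1.insert module_name child_modules,
                    st.2.insert module_name (read_module_scala_files module_text))
        child_modules.values.reverse.foldl (fun acc c => get_hier_visit src fuel c acc) st'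

def get_hier_alt (src_dict : List (String × String)) :
    (List (String × List (String × String))) × (List (String × List String)) :=
  let src := pvSrc src_dict
  if src.contains "XSTop" then      -- the assert
    let st := get_hier_visit src (src_dict.length + 1) "XSTop" (PySem.Dict.empty, PySem.Dict.empty)
    (st.1.items.map (fun p => (p.1, p.2.items)), st.2.items)
  else ([], [])                     -- AssertionError in Python (outside Pre_)

-- ===== PRECONDITION & SPEC =====
-- exactly A's returning domain: without the key "XSTop" the assert raises AssertionError
def Pre_get_hier (src_dict : List (String × String)) : Prop :=
  "XSTop" ∈ src_dict.map Prod.fst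
instance (src_dict : List (String × String)) : Decidable (Pre_get_hier src_dict) := by
  unfold Pre_get_hier; infer_instance

def pvWitness_get_hier : (List (String × String)) :=
  [("XSTop", "  Core core ( //\n  x // Core.scala:1:2"), ("Core", "")]

def Spec_get_hier (src_dict : List (String × String)) (out : (List (String × List (String × String))) × (List (String × List String))) : Prop := out = get_hier_alt src_dict
instance (src_dict : List (String × String)) (out : (List (String × List (String × String))) × (List (String × List String))) : Decidable (Spec_get_hier src_dict out) := by unfold Spec_get_hier; infer_instance

-- ===== CLAIM (what is proved, stated in full; the proofs are below) =====
def Claim_equal_get_hier : Prop := ∀ (src_dict : List (String × String)), Dom_get_hier src_dict → Pre_get_hier src_dict → Spec_get_hier src_dict (get_hier src_dict)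

-- ===== LEMMAS AND PROOFS =====

-- B's visit with the canonical sufficient fuel (proof-side abbreviation)
def pvVisit (src : PySem.Dict String String) (m : String)
    (st : (PySem.Dict String (PySem.Dict String String)) × (PySem.Dict String (PySem.Set String))) :
    (PySem.Dict String (PySem.Dict String String)) × (PySem.Dict String (PySem.Set String)) :=
  get_hier_visit src (pvUnvisited src st.1 + 1) m st

-- A's result as right-to-left sequential visits of the stack
def pvVisitStack (src : PySem.Dict String String)
    (st : (PySem.Dict String (PySem.Dict String String)) × (PySem.Dict String (PySem.Set String)))
    (stack : List String) :
    (PySem.Dict String (PySem.Dict String String)) × (PySem.Dict String (PySem.Set String)) :=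
  stack.reverse.foldl (fun a m => pvVisit src m a) st

lemma values_read_child_module_subset (module_text : String) (module_names : List String) :
    ∀ w ∈ (read_child_module module_text module_names).values, w ∈ module_names := by
  unfold read_child_module
  refine List.foldlRecOn (motive := fun d => ∀ w ∈ PySem.Dict.values d, w ∈ module_names) _ _
    (by intro w hw; simp [PySem.Dict.values, PySem.Dict.empty] at hw) ?_
  intro d hd line _
  dsimp only
  split
  · split
    · split
      · split
        · rename_i hin
          intro w hw
          rcases PySem.Dict.mem_values_insert _ _ _ _ hw with h | h
          · subst h; exact List.contains_iff_mem.mp hin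
          · exact hd w h
        · exact hd
      · exact hd
    · exact hd
  · exact hd

lemma visit_contains_mono (src : PySem.Dict String String) (fuel : Nat) (m : String) (st)
    (k : String) (hk : st.1.contains k = true) :
    (get_hier_visit src fuel m st).1.contains k = true := by
  induction fuel generalizing m st with
  | zero => simpa [get_hier_visit] using hk
  | succ fuel ih =>
    rw [get_hier_visit]
    split
    · exact hk
    · split
      · exact hk
      · dsimp only
        refine List.foldlRecOn (motive := fun (b : (PySem.Dict String (PySem.Dict String String)) × (PySem.Dict String (PySem.Set String))) => b.1.contains k = true) _ _ ?_ ?_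
        · simpa [PySem.Dict.contains_insert] using Or.inr hk
        · intro b hb c _
          exact ih c b hb

lemma visit_unvisited_le (src : PySem.Dict String String) (fuel : Nat) (m : String) (st) :
    pvUnvisited src (get_hier_visit src fuel m st).1 ≤ pvUnvisited src st.1 := by
  unfold pvUnvisited
  apply List.countP_mono_left
  intro a _ ha
  by_contra hcon
  have hc : st.1.contains a = true := by
    simp only [Bool.not_eq_true'] at hcon ⊢
    exact Bool.not_eq_false _ ▸ (by simpa using hcon)
  have := visit_contains_mono src fuel m st a hc
  simp [this] at ha

lemma visit_fuel_irrel (src : PySem.Dict String String) (fuel fuel' : Nat) (m : String) (st)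
    (h : pvUnvisited src st.1 < fuel) (h' : pvUnvisited src st.1 < fuel') :
    get_hier_visit src fuel m st = get_hier_visit src fuel' m st := by
  induction fuel generalizing fuel' m st with
  | zero => omega
  | succ fuel ih =>
    cases fuel' with
    | zero => omega
    | succ f' =>
      simp only [get_hier_visit]
      by_cases hcont : st.1.contains m = true
      · simp only [hcont, if_true]
      · simp only [hcont, Bool.false_eq_true, if_false]
        cases hg : src.get? m with
        | none => rfl
        | some module_text =>
          have hmem : m ∈ src.keys := by
            have hne : src.get? m ≠ none := by simp [hg]
            rw [Ne, PySem.Dict.get?_eq_none_iff_not_mem_keys] at hne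
            exact not_not.mp hne
          have hlt := pvUnvisited_insert_lt src st.1 m
            (read_child_module module_text src.keys) hmem (by simpa using hcont)
          dsimp only
          have inner : ∀ (l : List String) a, pvUnvisited src a.1 < fuel → pvUnvisited src a.1 < f' →
              l.foldl (fun acc c => get_hier_visit src fuel c acc) a
                = l.foldl (fun acc c => get_hier_visit src f' c acc) a := by
            intro l
            induction l with
            | nil => intro a _ _; rfl
            | cons c t iht =>
              intro a h1 h2
              simp only [List.foldl_cons]
              rw [ih f' c a h1 h2]
              exact iht _ (lt_of_le_of_lt (visit_unvisited_le src f' c a) h1)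
                (lt_of_le_of_lt (visit_unvisited_le src f' c a) h2)
          exact inner _ _
            (by show pvUnvisited src (st.1.insert m (read_child_module module_text src.keys)) < _
                omega)
            (by show pvUnvisited src (st.1.insert m (read_child_module module_text src.keys)) < _
                omega)

lemma visitStack_append (src : PySem.Dict String String) (st) (u v : List String) :
    pvVisitStack src st (u ++ v) = pvVisitStack src (pvVisitStack src st v) u := by
  unfold pvVisitStack
  rw [List.reverse_append, List.foldl_append]

lemma visitStack_singleton (src : PySem.Dict String String) (st) (m : String) :
    pvVisitStack src st [m] = pvVisit src m st := rfl

-- a fold of B's visit at any one sufficient fuel is the fold at the canonical fuel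
lemma foldl_visit_fuel (src : PySem.Dict String String) (F : Nat) (l : List String) :
    ∀ a, pvUnvisited src a.1 < F →
      l.foldl (fun acc c => get_hier_visit src F c acc) a
        = l.foldl (fun acc c => pvVisit src c acc) a := by
  induction l with
  | nil => intro a _; rfl
  | cons c t ih =>
    intro a ha
    simp only [List.foldl_cons]
    rw [show get_hier_visit src F c a = pvVisit src c a from
      visit_fuel_irrel src F (pvUnvisited src a.1 + 1) c a ha (by omega)]
    exact ih _ (lt_of_le_of_lt (visit_unvisited_le src _ c a) ha)

-- children already recorded in res₀ may be dropped from a visit fold: visit skips them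
lemma foldl_visit_filter (src : PySem.Dict String String)
    (res₀ : PySem.Dict String (PySem.Dict String String)) (l : List String) :
    ∀ a, (∀ c, res₀.contains c = true → a.1.contains c = true) →
      (l.filter (fun c => !(res₀.contains c))).foldl (fun acc c => pvVisit src c acc) a
        = l.foldl (fun acc c => pvVisit src c acc) a := by
  induction l with
  | nil => intro a _; rfl
  | cons c t ih =>
    intro a ha
    by_cases hc : res₀.contains c = true
    · have hac : a.1.contains c = true := ha c hc
      have hskip : pvVisit src c a = a := by
        unfold pvVisit
        rw [get_hier_visit]
        simp [hac]
      simp only [List.filter_cons, hc, Bool.not_true, Bool.false_eq_true, if_false]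
      rw [List.foldl_cons, hskip]
      exact ih a ha
    · simp only [Bool.not_eq_true] at hc
      simp only [List.filter_cons, hc, Bool.not_false, List.foldl_cons]
      refine ih _ ?_
      intro d hd
      exact visit_contains_mono src _ c a d (ha d hd)

lemma loop_eq_visitStack (src : PySem.Dict String String) (res scala stack) :
    (∀ c ∈ stack, c ∈ src.keys) →
    get_hier_loop src res scala stack = pvVisitStack src (res, scala) stack := by
  fun_induction get_hier_loop src res scala stack with
  | case1 res scala => intro _; rfl
  | case2 res scala h0 t0 m stack' hc ih =>
    intro hcs
    have hdecomp : stack' ++ [m] = h0 :: t0 := List.dropLast_concat_getLast (by simp)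
    rw [← hdecomp, visitStack_append, visitStack_singleton]
    have hskip : pvVisit src m (res, scala) = (res, scala) := by
      unfold pvVisit
      rw [get_hier_visit]
      simp [hc]
    rw [hskip]
    exact ih (fun c hcm => hcs c (by rw [← hdecomp]; exact List.mem_append_left _ hcm))
  | case3 a1 a2 a3 a4 a5 a6 a7 =>
    intro hcs
    exact absurd (hcs a5 (List.getLast_mem _))
      ((PySem.Dict.get?_eq_none_iff_not_mem_keys src a5).mp a7)
  | case4 res scala h0 t0 m stack' hc module_text hg child_modules scala' res' stack'' ih =>
    intro hcs
    have hdecomp : stack' ++ [m] = h0 :: t0 := List.dropLast_concat_getLast (by simp)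
    have hmem : m ∈ src.keys := by
      have hne : src.get? m ≠ none := by simp [hg]
      rw [Ne, PySem.Dict.get?_eq_none_iff_not_mem_keys] at hne
      exact not_not.mp hne
    have hcf : res.contains m = false := by simpa using hc
    have hstack'' : stack''
        = stack' ++ child_modules.values.filter (fun c => !(res'.contains c)) := by
      show List.foldl _ _ _ = _
      simp only [dite_eq_ite]
      exact PySem.List.foldl_append_if_eq_filter _ _ _
    have hsub : ∀ c ∈ stack'', c ∈ src.keys := by
      intro c hcm
      rw [hstack''] at hcm
      rcases List.mem_append.mp hcm with h | h
      · exact hcs c (by rw [← hdecomp]; exact List.mem_append_left _ h)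
      · exact values_read_child_module_subset module_text src.keys c (List.mem_of_mem_filter h)
    rw [ih hsub, ← hdecomp, visitStack_append, visitStack_singleton, hstack'',
      visitStack_append]
    congr 1
    -- the freshly-pushed (filtered) children, visited right to left, ARE B's visit of m
    have hrhs : pvVisit src m (res, scala)
        = child_modules.values.reverse.foldl
            (fun acc c => get_hier_visit src (pvUnvisited src res) c acc) (res', scala') := by
      unfold pvVisit
      rw [get_hier_visit]
      simp only [hcf, Bool.false_eq_true, if_false, hg]
      rfl
    rw [hrhs]
    have hlt : pvUnvisited src res' < pvUnvisited src res :=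
      pvUnvisited_insert_lt src res m child_modules hmem hcf
    rw [foldl_visit_fuel src (pvUnvisited src res) _ (res', scala') hlt]
    show pvVisitStack src (res', scala')
        (List.filter (fun c => !res'.contains c) child_modules.values) = _
    unfold pvVisitStack
    rw [← List.filter_reverse]
    exact foldl_visit_filter src res' child_modules.values.reverse (res', scala')
      (fun c h => h)

-- ===== VERDICT (by name: the statement is the Claim_ definition above) =====
theorem get_hier_spec : Claim_equal_get_hier := by
  unfold Claim_equal_get_hier
  intro src_dict _ hpre
  unfold Spec_get_hier get_hier get_hier_alt
  have hkeys : (pvSrc src_dict).keys = PySem.Set.ofList (src_dict.map Prod.fst) := by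
    unfold pvSrc
    rw [PySem.Dict.keys_foldl_insert_key src_dict Prod.fst (fun _ p => p.2) PySem.Dict.empty]
    rw [show (PySem.Dict.empty : PySem.Dict String String).keys = [] from rfl]
    exact PySem.Set.update_nil_left _
  have hmem : "XSTop" ∈ (pvSrc src_dict).keys := by
    rw [hkeys]
    exact (PySem.Set.mem_ofList _ _).mpr hpre
  have hcont : (pvSrc src_dict).contains "XSTop" = true :=
    (PySem.Dict.contains_iff_mem_keys _ _).mpr hmem
  have hstate : get_hier_loop (pvSrc src_dict) PySem.Dict.empty PySem.Dict.empty ["XSTop"]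
      = get_hier_visit (pvSrc src_dict) (src_dict.length + 1) "XSTop"
          (PySem.Dict.empty, PySem.Dict.empty) := by
    rw [loop_eq_visitStack (pvSrc src_dict) PySem.Dict.empty PySem.Dict.empty ["XSTop"]
      (by intro c hcm; simp only [List.mem_singleton] at hcm; subst hcm; exact hmem)]
    rw [visitStack_singleton]
    unfold pvVisit
    apply visit_fuel_irrel
    · omega
    · have h1 : pvUnvisited (pvSrc src_dict) PySem.Dict.empty ≤ src_dict.length := by
        unfold pvUnvisited
        calc (pvSrc src_dict).keys.countP _ ≤ (pvSrc src_dict).keys.length :=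
              List.countP_le_length
          _ ≤ (src_dict.map Prod.fst).length := by
              rw [hkeys]; exact PySem.Set.length_ofList_le _
          _ = src_dict.length := List.length_map _
      show pvUnvisited (pvSrc src_dict) PySem.Dict.empty < src_dict.length + 1
      omega
  simp only [hcont, if_true, hstate]
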